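-- pv_equiv track=rewrite | github.com/olidesmarais/exercices-inf1007 | ch05_3/exercice.py | format_horizontal_histogram
-- ===== SOURCE A (Python) =====
-- def format_horizontal_histogram(histogram):
-- 	BLOCK_CHAR = "|"
-- 	LINE_CHAR = "¯"
--
-- 	resultat = ''
--
-- 	# Ajouter l'axe
-- 	for _ in enumerate(histogram):
-- 		# if idx == 0:
-- 		# 	continue
-- 		resultat += LINE_CHAR
--
-- 	for niveau in range(max(histogram)):
-- 		ligne_courante = ''
-- 		for idx, valeur in enumerate(histogram):
-- 			if idx == 0:
-- 				continue
-- 			if valeur >= niveau + 1: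
-- 				ligne_courante += BLOCK_CHAR
-- 			else:
-- 				ligne_courante += ' '
-- 		resultat = ligne_courante + '\n' + resultat
--
-- 	return resultat
-- ===== SOURCE B (Python) =====
-- def format_horizontal_histogram(histogram):
--     M = max(histogram)
--     axis = "\u00af" * len(histogram)
--     if M <= 0:
--         return axis
--     cols = []
--     for v in histogram[1:]:
--         h = v if v > 0 else 0
--         cols.append(" " * (M - h) + "|" * h)
--     rows = ["".join(col[r] for col in cols) for r in range(M)]
--     return "\n".join(rows) + "\n" + axis
-- ===== Notes on version B (the rewrite author's own statement) =====
-- stated objective: faster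
-- what changed: A builds the picture row by row with a nested loop per level and prepends each row to the accumulated result string (re-copying it every level); B builds one column string per bar value and transposes by index, joining all rows once, so the output is assembled in a single pass.
-- outside the precondition, e.g. on format_horizontal_histogram([]): A raises ValueError, B raises ValueError
import Mathlib
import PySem

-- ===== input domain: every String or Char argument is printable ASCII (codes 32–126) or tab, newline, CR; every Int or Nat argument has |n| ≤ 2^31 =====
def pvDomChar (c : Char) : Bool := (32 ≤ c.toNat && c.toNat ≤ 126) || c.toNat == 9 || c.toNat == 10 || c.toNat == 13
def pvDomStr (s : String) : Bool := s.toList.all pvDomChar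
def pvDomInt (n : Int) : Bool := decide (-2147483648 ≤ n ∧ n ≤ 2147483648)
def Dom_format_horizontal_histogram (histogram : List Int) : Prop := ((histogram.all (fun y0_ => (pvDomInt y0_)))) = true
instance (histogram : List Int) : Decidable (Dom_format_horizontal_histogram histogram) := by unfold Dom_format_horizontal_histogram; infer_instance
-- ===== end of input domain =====

-- B replaces A's row-by-row nested loop (which prepends each level's line, re-copying the
-- accumulated string) with a column-per-bar build plus an index transposition joined once;
-- equivalence of the return value is proved on nonempty input (max([]) raises in both).

-- ===== PORT A =====
-- strings are carried as List Char (PySem.Chars representation) and wrapped by String.ofList at the end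
def format_horizontal_histogram (histogram : List Int) : String :=
  let axis : List Char := (PySem.List.enumerate histogram).foldl (fun r _ => r ++ ['¯']) []
  let M : Int := (PySem.List.max? histogram (fun x => x)).getD 0   -- max(histogram); Pre_ excludes [] (ValueError)
  let res : List Char := (PySem.List.pyRange 0 M 1).foldl
    (fun resultat niveau =>
      let ligne := (PySem.List.enumerate histogram).foldl
        (fun l p => if p.1 == 0 then l
          else if p.2 ≥ niveau + 1 then l ++ ['|'] else l ++ [' ']) ([] : List Char)
      ligne ++ '\n' :: resultat) axis
  String.ofList res

-- ===== PORT B =====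
def format_horizontal_histogram_alt (histogram : List Int) : String :=
  let M : Int := (PySem.List.max? histogram (fun x => x)).getD 0   -- max(histogram); Pre_ excludes [] (ValueError)
  let axis : List Char := List.replicate histogram.length '¯'
  if M ≤ 0 then String.ofList axis
  else
    let Mn : Nat := M.toNat
    let cols : List (List Char) := (histogram.drop 1).map (fun v =>
      let h : Nat := (if 0 < v then v else 0).toNat
      List.replicate (Mn - h) ' ' ++ List.replicate h '|')
    let rows : List (List Char) := (List.range Mn).map (fun r => cols.map (fun c => c.getD r ' '))
    String.ofList (PySem.Chars.join ['\n'] rows ++ '\n' :: axis)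

-- ===== PRECONDITION & SPEC =====
-- Pre_ excludes only the empty list, on which Python's max([]) raises ValueError in both A and B.
def Pre_format_horizontal_histogram (histogram : List Int) : Prop := histogram ≠ []
instance (histogram : List Int) : Decidable (Pre_format_horizontal_histogram histogram) := by unfold Pre_format_horizontal_histogram; infer_instance
def pvWitness_format_horizontal_histogram : List Int := [2, 3, 1]

def Spec_format_horizontal_histogram (histogram : List Int) (out : String) : Prop := out = format_horizontal_histogram_alt histogram
instance (histogram : List Int) (out : String) : Decidable (Spec_format_horizontal_histogram histogram out) := by unfold Spec_format_horizontal_histogram; infer_instance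

-- ===== CLAIM (what is proved, stated in full; the proofs are below) =====
def Claim_equal_format_horizontal_histogram : Prop := ∀ (histogram : List Int), Dom_format_horizontal_histogram histogram → Pre_format_horizontal_histogram histogram → Spec_format_horizontal_histogram histogram (format_horizontal_histogram histogram)

-- ===== LEMMAS AND PROOFS =====

-- the axis loop appends one '¯' per element
theorem pv_axis_fold (l : List (Int × Int)) (acc : List Char) :
    l.foldl (fun r _ => r ++ ['¯']) acc = acc ++ List.replicate l.length '¯' := by
  induction l generalizing acc with
  | nil => simp
  | cons x t ih =>
      rw [List.foldl_cons, ih]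
      simp [List.replicate_succ, List.append_assoc]

-- the inner line loop over enumerate t s with s ≥ 1 never skips
theorem pv_line_fold (niveau : Int) (t : List Int) (s : Int) (acc : List Char) (hs : 1 ≤ s) :
    (PySem.List.enumerate t s).foldl
        (fun l p => if p.1 == 0 then l
          else if p.2 ≥ niveau + 1 then l ++ ['|'] else l ++ [' ']) acc
      = acc ++ t.map (fun v => if niveau + 1 ≤ v then '|' else ' ') := by
  induction t generalizing s acc with
  | nil => simp [PySem.List.enumerate_nil]
  | cons v t ih =>
      rw [PySem.List.enumerate_cons, List.foldl_cons]
      have hne : (s == (0 : Int)) = false := by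
        simp only [beq_eq_false_iff_ne]; omega
      rw [ih _ _ (by omega)]
      simp only [hne, Bool.false_eq_true, if_false, List.map_cons, ge_iff_le]
      by_cases h : niveau + 1 ≤ v <;> simp [h, List.append_assoc]

-- F f n = the A-side prepending fold's prefix
def pvF (f : Nat → List Char) : Nat → List Char
  | 0 => []
  | n + 1 => f n ++ '\n' :: pvF f n

theorem pv_prepend_fold (f : Nat → List Char) (n : Nat) (acc : List Char) :
    (List.range n).foldl (fun res k => f k ++ '\n' :: res) acc = pvF f n ++ acc := by
  induction n generalizing acc with
  | zero => simp [pvF]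
  | succ n ih =>
      rw [List.range_succ, List.foldl_append, ih]
      simp [pvF, List.append_assoc]

theorem pv_F_eq_flatten (f : Nat → List Char) (n : Nat) :
    pvF f n = ((List.range n).map (fun r => f (n - 1 - r) ++ ['\n'])).flatten := by
  induction n with
  | zero => simp [pvF]
  | succ n ih =>
      rw [List.range_succ_eq_map]
      simp only [List.map_cons, List.map_map, List.flatten_cons, Nat.add_sub_cancel, Nat.sub_zero]
      have harith : ∀ r : Nat, n - 1 - r = n - (r + 1) := by intro r; omega
      rw [pvF, ih]
      simp [Function.comp_def, harith, List.append_assoc]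

theorem pv_join_flatten (l : List (List Char)) (a : List Char) :
    PySem.Chars.join ['\n'] (a :: l) ++ ['\n'] = ((a :: l).map (· ++ ['\n'])).flatten := by
  induction l generalizing a with
  | nil => simp [PySem.Chars.join_singleton]
  | cons b l ih =>
      rw [PySem.Chars.join_cons_cons]
      simp only [List.map_cons, List.flatten_cons] at ih ⊢
      rw [List.append_assoc, List.append_assoc, ← ih]
      simp [List.append_assoc]

theorem pv_getD_rep_rep (a b r : Nat) (x y d : Char) :
    (List.replicate a x ++ List.replicate b y).getD r d
      = if r < a then x else if r < a + b then y else d := by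
  induction a generalizing r with
  | zero =>
      simp only [List.replicate_zero, List.nil_append, Nat.zero_add, Nat.not_lt_zero, if_false]
      induction b generalizing r with
      | zero => simp [List.getD]
      | succ b ihb =>
          cases r with
          | zero => simp [List.replicate_succ, List.getD]
          | succ r =>
              simp only [List.replicate_succ, List.getD_cons_succ, ihb]
              by_cases h : r < b
              · simp [h, (by omega : r + 1 < b + 1)]
              · rw [if_neg h, if_neg (by omega : ¬ r + 1 < b + 1)]
  | succ a ih =>
      cases r with
      | zero => simp [List.replicate_succ, List.getD]
      | succ r =>
          simp only [List.replicate_succ, List.cons_append, List.getD_cons_succ, ih]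
          by_cases h1 : r < a
          · simp [h1, Nat.succ_lt_succ h1]
          · have : ¬ r + 1 < a + 1 := by omega
            simp [h1, this]
            by_cases h2 : r < a + b
            · simp [h2, (by omega : r + 1 < a + 1 + b)]
            · simp [h2]; omega

-- ===== VERDICT (by name: the statement is the Claim_ definition above) =====
theorem pv_join_flatten' (rows : List (List Char)) (axis : List Char) (h : rows ≠ []) :
    PySem.Chars.join ['\n'] rows ++ '\n' :: axis
      = (rows.map (· ++ ['\n'])).flatten ++ axis := by
  cases rows with
  | nil => exact absurd rfl h
  | cons a l =>
      rw [← pv_join_flatten]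
      simp [List.append_assoc]

-- per-character agreement of A's line test with B's column lookup
theorem pv_cell (m v : Int) (r : Nat) (_hm : 0 < m) (_hv : v ≤ m) (hr : r < m.toNat) :
    ((List.replicate (m.toNat - (if 0 < v then v else 0).toNat) ' '
        ++ List.replicate ((if 0 < v then v else 0).toNat) '|').getD r ' ')
      = (if (0 : Int) + ((m.toNat - 1 - r : Nat) : Int) + 1 ≤ v then '|' else ' ') := by
  rw [pv_getD_rep_rep]
  by_cases hv0 : 0 < v
  · simp only [if_pos hv0]
    split_ifs <;> first | rfl | omega
  · simp only [if_neg hv0]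
    split_ifs <;> first | rfl | omega

theorem format_horizontal_histogram_spec : Claim_equal_format_horizontal_histogram := by
  unfold Claim_equal_format_horizontal_histogram
  intro hist _ hpre
  unfold Spec_format_horizontal_histogram
  obtain ⟨hd, t, rfl⟩ : ∃ hd t, hist = hd :: t := by
    cases hist with
    | nil => exact absurd rfl hpre
    | cons a b => exact ⟨a, b, rfl⟩
  have hmax : PySem.List.max? (hd :: t) (fun x => x) = some (t.foldl max hd) :=
    PySem.List.max?_id_cons hd t
  set m : Int := t.foldl max hd with hm_def
  unfold format_horizontal_histogram format_horizontal_histogram_alt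
  rw [hmax]
  simp only [Option.getD_some]
  rw [pv_axis_fold, PySem.List.length_enumerate, List.nil_append]
  by_cases hm0 : m ≤ 0
  · rw [PySem.List.pyRange_one_eq_nil hm0, if_pos hm0]
    simp
  · rw [if_neg hm0]
    rw [Int.not_le] at hm0
    -- A side: fold over the range of levels
    rw [PySem.List.pyRange_one, List.foldl_map]
    have hline : ∀ (niveau : Int),
        (PySem.List.enumerate (hd :: t) 0).foldl
          (fun l p => if p.1 == 0 then l
            else if p.2 ≥ niveau + 1 then l ++ ['|'] else l ++ [' ']) ([] : List Char)
        = t.map (fun v => if niveau + 1 ≤ v then '|' else ' ') := by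
      intro niveau
      rw [PySem.List.enumerate_cons, List.foldl_cons]
      simp only [BEq.rfl, if_true, zero_add]
      rw [pv_line_fold niveau t 1 [] (le_refl 1), List.nil_append]
    simp only [hline]
    rw [show ((m - 0).toNat) = m.toNat by omega]
    rw [pv_prepend_fold, pv_F_eq_flatten]
    -- B side: join of the transposed rows
    have hMn : m.toNat ≠ 0 := by omega
    rw [pv_join_flatten' _ _ (by simp [List.range_eq_nil, hMn]), List.map_map]
    congr 1
    congr 1
    congr 1
    apply List.map_congr_left
    intro r hr
    rw [List.mem_range] at hr
    simp only [Function.comp_def, List.drop_one, List.tail_cons, List.map_map]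
    congr 1
    apply List.map_congr_left
    intro v hv
    have hvle : v ≤ m := by
      have := PySem.List.max?_isMax hmax v (List.mem_cons_of_mem hd hv)
      simpa using this
    exact (pv_cell m v r hm0 hvle hr).symm
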